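-- pv_equiv track=rewrite | github.com/sonnt0201/device-service-client | sim_dev_zcheng.py | str2arr
-- ===== SOURCE A (Python) =====
-- def str2arr(str):
--     arr = []
--
--     if len(str.split('.')) >= 2:
--         left_str = str.split('.')[0]
--         right_str = str.split('.')[1]
--
--         for i in range(len(left_str)):
--             arr.append("" + left_str[i])
--
--         arr[len(arr) - 1] += "."
--         for i in range(len(right_str)):
--             arr.append("" + right_str[i])
--     else:
--         for i in range(len(str)):
--             arr.append("" + str[i])
--     return arr
-- ===== SOURCE B (Python) =====
-- def str2arr(str):
--     # One pass over the characters with a seen_dot flag; no split() calls.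
--     arr = []
--     seen_dot = False
--     for ch in str:
--         if ch == '.':
--             if seen_dot:
--                 break
--             seen_dot = True
--             arr[-1] += '.'   # IndexError on a leading '.', same as the original
--         else:
--             arr.append(ch)
--     return arr
-- ===== Notes on version B (the rewrite author's own statement) =====
-- stated objective: simpler
-- what changed: Replaced the three split('.') calls plus two index loops by a single pass over the characters with a seen-dot flag that appends '.' to the last emitted char and stops at a second dot.
-- outside the precondition, e.g. on str2arr('.'): A raises IndexError, B raises IndexError
import Mathlib
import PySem

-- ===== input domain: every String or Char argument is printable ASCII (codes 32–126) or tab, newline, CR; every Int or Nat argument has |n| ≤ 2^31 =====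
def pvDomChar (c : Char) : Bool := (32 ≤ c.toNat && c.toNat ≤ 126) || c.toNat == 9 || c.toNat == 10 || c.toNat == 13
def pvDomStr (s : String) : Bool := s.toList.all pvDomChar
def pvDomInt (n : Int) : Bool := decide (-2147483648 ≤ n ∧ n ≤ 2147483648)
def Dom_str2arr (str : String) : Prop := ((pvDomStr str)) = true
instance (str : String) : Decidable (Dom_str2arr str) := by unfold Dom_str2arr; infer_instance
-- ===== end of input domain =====

-- B replaces A's repeated split('.') passes by one pass with a seen-dot flag (objective: simpler).

-- ===== PORT A =====
-- arr[len(arr) - 1] += "." : on an empty arr Python raises IndexError (excluded by Pre_);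
-- here the pyGet? is none and nothing is appended.
def setLastDot (arr : List String) : List String :=
  arr.take (arr.length - 1) ++ ((PySem.List.pyGet? arr ((arr.length : Int) - 1)).map (· ++ ".")).toList

def str2arr (str : String) : List String :=
  let parts := (PySem.Str.split? str ".").getD []
  if 2 ≤ parts.length then
    let left_str := (PySem.List.pyGet? parts 0).getD ""
    let right_str := (PySem.List.pyGet? parts 1).getD ""
    let arr := left_str.toList.foldl (fun a c => a ++ [String.ofList [c]]) []
    let arr := setLastDot arr
    right_str.toList.foldl (fun a c => a ++ [String.ofList [c]]) arr
  else
    str.toList.foldl (fun a c => a ++ [String.ofList [c]]) []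

-- ===== PORT B =====
-- arr[-1] += "." : on an empty arr Python raises IndexError (excluded by Pre_); here it is a no-op.
def dotLast (arr : List String) : List String :=
  arr.dropLast ++ ((arr.getLast?).map (· ++ ".")).toList

def altGo : List Char → Bool → List String → List String
  | [], _, arr => arr
  | c :: rest, seen, arr =>
    if c = '.' then
      if seen then arr
      else altGo rest true (dotLast arr)
    else altGo rest seen (arr ++ [String.ofList [c]])

def str2arr_alt (str : String) : List String :=
  altGo str.toList false []

-- ===== PRECONDITION & SPEC =====
-- Pre_ excludes exactly the strings starting with '.', on which both A and B raise IndexError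
-- (they append '.' to the last element of a still-empty list).
def Pre_str2arr (str : String) : Prop := str.toList.head? ≠ some '.'
instance (str : String) : Decidable (Pre_str2arr str) := by unfold Pre_str2arr; infer_instance

def pvWitness_str2arr : String := "12.5"

def Spec_str2arr (str : String) (out : List String) : Prop := out = str2arr_alt str
instance (str : String) (out : List String) : Decidable (Spec_str2arr str out) := by unfold Spec_str2arr; infer_instance

-- ===== CLAIM (what is proved, stated in full; the proofs are below) =====
def Claim_equal_str2arr : Prop := ∀ (str : String), Dom_str2arr str → Pre_str2arr str → Spec_str2arr str (str2arr str)

-- ===== LEMMAS AND PROOFS =====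

/-- The segment list produced by splitting at '.' degrees, specified structurally. -/
def pvSegs (pre : List Char) : List Char → List (List Char)
  | [] => [pre]
  | c :: rest => if c = '.' then pre :: pvSegs [] rest else pvSegs (pre ++ [c]) rest

theorem go_eq_pvSegs : ∀ (fuel : Nat) (l cur : List Char) (acc : List (List Char)),
    l.length < fuel →
    PySem.Chars.splitOn.go ['.'] fuel l cur acc = acc.reverse ++ pvSegs cur.reverse l := by
  intro fuel
  induction fuel with
  | zero => intro l cur acc h; omega
  | succ f ih =>
    intro l cur acc h
    cases l with
    | nil => simp [PySem.Chars.splitOn.go, pvSegs]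
    | cons c rest =>
      by_cases hc : c = '.'
      · subst hc
        have hpre : (['.'] : List Char).isPrefixOf ('.' :: rest) = true := by
          simp [List.isPrefixOf]
        rw [PySem.Chars.splitOn.go]
        simp only [hpre, if_true, List.length_cons, List.drop_succ_cons, List.length_nil, List.drop_zero]
        rw [ih rest [] (cur.reverse :: acc) (by simp at h; omega)]
        simp [pvSegs]
      · have hpre : (['.'] : List Char).isPrefixOf (c :: rest) = false := by
          simp [List.isPrefixOf]
          exact Ne.symm hc
        rw [PySem.Chars.splitOn.go]
        simp only [hpre, if_false, Bool.false_eq_true]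
        rw [ih rest (c :: cur) acc (by simp at h; omega)]
        simp [pvSegs, hc]

theorem splitOn_eq_pvSegs (cs : List Char) :
    PySem.Chars.splitOn cs ['.'] = pvSegs [] cs := by
  unfold PySem.Chars.splitOn
  rw [go_eq_pvSegs (cs.length + 1) cs [] [] (by omega)]
  simp

theorem pvSegs_no_dot (l : List Char) : ∀ pre, '.' ∉ l → pvSegs pre l = [pre ++ l] := by
  induction l with
  | nil => intro pre _; simp [pvSegs]
  | cons c rest ih =>
    intro pre h
    have hc : c ≠ '.' := fun hh => h (by simp [hh])
    simp only [pvSegs, if_neg hc]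
    rw [ih (pre ++ [c]) (fun hh => h (by simp [hh]))]
    simp

theorem pvSegs_dot (t : List Char) : ∀ pre r, '.' ∉ t →
    pvSegs pre (t ++ '.' :: r) = (pre ++ t) :: pvSegs [] r := by
  induction t with
  | nil => intro pre r _; simp [pvSegs]
  | cons c rest ih =>
    intro pre r h
    have hc : c ≠ '.' := fun hh => h (by simp [hh])
    simp only [List.cons_append, pvSegs, if_neg hc]
    rw [ih (pre ++ [c]) r (fun hh => h (by simp [hh]))]
    simp

theorem pvSegs_head (l : List Char) : ∀ pre,
    ∃ tl, pvSegs pre l = (pre ++ l.takeWhile (· ≠ '.')) :: tl := by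
  induction l with
  | nil => intro pre; exact ⟨[], by simp [pvSegs]⟩
  | cons c rest ih =>
    intro pre
    by_cases hc : c = '.'
    · subst hc
      exact ⟨pvSegs [] rest, by simp [pvSegs, List.takeWhile]⟩
    · obtain ⟨tl, htl⟩ := ih (pre ++ [c])
      refine ⟨tl, ?_⟩
      simp only [pvSegs, if_neg hc, htl, List.takeWhile]
      simp [hc]

theorem foldA (l : List Char) : ∀ arr : List String,
    l.foldl (fun a c => a ++ [String.ofList [c]]) arr
      = arr ++ l.map (fun c => String.ofList [c]) := by
  induction l with
  | nil => intro arr; simp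
  | cons c rest ih => intro arr; simp [List.foldl_cons, ih]

theorem altGo_app_nodot (t : List Char) : ∀ (u : List Char) (seen : Bool) (arr : List String),
    '.' ∉ t →
    altGo (t ++ u) seen arr = altGo u seen (arr ++ t.map (fun c => String.ofList [c])) := by
  induction t with
  | nil => intro u seen arr _; simp
  | cons c rest ih =>
    intro u seen arr h
    have hc : c ≠ '.' := fun hh => h (by simp [hh])
    simp only [List.cons_append, altGo, if_neg hc]
    rw [ih u seen (arr ++ [String.ofList [c]]) (fun hh => h (by simp [hh]))]
    simp

theorem altGo_true (l : List Char) : ∀ arr : List String,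
    altGo l true arr = arr ++ (l.takeWhile (· ≠ '.')).map (fun c => String.ofList [c]) := by
  induction l with
  | nil => intro arr; simp [altGo]
  | cons c rest ih =>
    intro arr
    by_cases hc : c = '.'
    · subst hc; simp [altGo, List.takeWhile]
    · simp only [altGo, if_neg hc, List.takeWhile]
      rw [ih (arr ++ [String.ofList [c]])]
      simp [hc]

theorem setLastDot_eq_dotLast (arr : List String) (h : arr ≠ []) :
    setLastDot arr = dotLast arr := by
  unfold setLastDot dotLast
  have hlen : 1 ≤ arr.length := List.length_pos_of_ne_nil h
  have h1 : ((arr.length : Int) - 1) = ((arr.length - 1 : Nat) : Int) := by omega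
  rw [h1, PySem.List.pyGet?_natCast]
  rw [List.getLast?_eq_getElem?]
  rw [← List.dropLast_eq_take]

theorem exists_dot_split (cs : List Char) (h : '.' ∈ cs) :
    ∃ t r, cs = t ++ '.' :: r ∧ '.' ∉ t := by
  induction cs with
  | nil => simp at h
  | cons c rest ih =>
    by_cases hc : c = '.'
    · exact ⟨[], rest, by simp [hc], by simp⟩
    · have : '.' ∈ rest := by
        rcases List.mem_cons.mp h with h1 | h1
        · exact absurd h1.symm hc
        · exact h1
      obtain ⟨t, r, heq, hnt⟩ := ih this
      refine ⟨c :: t, r, by simp [heq], ?_⟩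
      intro hm
      rcases List.mem_cons.mp hm with h1 | h1
      · exact hc h1.symm
      · exact hnt h1

theorem split?_dot (str : String) :
    (PySem.Str.split? str ".").getD [] = (pvSegs [] str.toList).map String.ofList := by
  unfold PySem.Str.split?
  have : ".".toList = ['.'] := rfl
  rw [this]
  unfold PySem.Chars.split?
  simp [splitOn_eq_pvSegs]


-- ===== VERDICT (by name: the statement is the Claim_ definition above) =====
theorem str2arr_spec : Claim_equal_str2arr := by
  intro str _ hpre
  unfold Spec_str2arr str2arr str2arr_alt
  rw [split?_dot]
  by_cases hdot : '.' ∈ str.toList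
  · -- the dot case
    obtain ⟨t, r, heq, hnt⟩ := exists_dot_split str.toList hdot
    have htne : t ≠ [] := by
      intro ht
      apply hpre
      rw [heq, ht]
      rfl
    rw [heq, pvSegs_dot t [] r hnt]
    obtain ⟨tl, htl⟩ := pvSegs_head r []
    rw [htl]
    simp only [List.nil_append, List.map_cons, List.length_cons]
    rw [if_pos (by omega)]
    have h0 : PySem.List.pyGet?
        (String.ofList t :: String.ofList (r.takeWhile (· ≠ '.')) :: tl.map String.ofList) 0
        = some (String.ofList t) := by
      simp only [PySem.List.pyGet?, PySem.List.pyIdx?]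
      rw [if_pos (by omega), if_pos (by simp; omega)]
      simp
    have h1 : PySem.List.pyGet?
        (String.ofList t :: String.ofList (r.takeWhile (· ≠ '.')) :: tl.map String.ofList) 1
        = some (String.ofList (r.takeWhile (· ≠ '.'))) := by
      simp only [PySem.List.pyGet?, PySem.List.pyIdx?]
      rw [if_pos (by omega), if_pos (by simp)]
      simp
    rw [h0, h1]
    simp only [Option.getD_some, String.toList_ofList]
    rw [foldA, foldA]
    rw [altGo_app_nodot t ('.' :: r) false [] hnt]
    have harrne : ([] : List String) ++ t.map (fun c => String.ofList [c]) ≠ [] := by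
      simp [htne]
    simp only [altGo, if_pos]
    rw [altGo_true]
    rw [setLastDot_eq_dotLast _ harrne]
    simp
  · -- no dot: one segment, A takes the else branch, B never flips the flag
    rw [pvSegs_no_dot str.toList [] hdot]
    simp only [List.nil_append, List.map_cons, List.map_nil, List.length_cons, List.length_nil]
    rw [if_neg (by omega)]
    rw [foldA]
    have : str.toList = str.toList ++ [] := by simp
    rw [show altGo str.toList false [] = altGo (str.toList ++ []) false [] by simp]
    rw [altGo_app_nodot str.toList [] false [] hdot]
    simp [altGo]
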